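-- pv_equiv track=rewrite | github.com/aoliaoaoaojiao/GraduationDesignArchives | Traffic/TrafficData/get_traffic_data/util.py | polyline_process
-- ===== SOURCE A (Python) =====
-- def polyline_process(polyline):
--     """
--     处理坐标点
--     Args:
--         polyline:坐标点
--
--     Returns:返回以‘;’分隔的坐标点
--
--     """
--     result = []
--     for data in polyline.split(";"):
--         if "|" in data:
--             # 如果遇到以‘|’分隔的坐标点，则取第一个坐标
--             result.append(data.split("|")[0])
--             continue
--         result.append(data)
--     return ";".join(result)
-- ===== SOURCE B (Python) =====
-- def polyline_process(polyline):
--     """Single pass over the characters with a 'skipping' flag instead of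
--     split/loop/append/join: after a '|' everything up to the next ';' is dropped."""
--     out = []
--     skipping = False
--     for ch in polyline:
--         if skipping:
--             if ch == ';':
--                 skipping = False
--                 out.append(ch)
--         elif ch == '|':
--             skipping = True
--         else:
--             out.append(ch)
--     return ''.join(out)
-- ===== Notes on version B (the rewrite author's own statement) =====
-- stated objective: alternative
-- what changed: Replaces split-on-';'/inner split-on-'|'/join with one character-by-character scan carrying a boolean 'skipping' state that drops everything between a '|' and the next ';'; no token lists are built.
import Mathlib
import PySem

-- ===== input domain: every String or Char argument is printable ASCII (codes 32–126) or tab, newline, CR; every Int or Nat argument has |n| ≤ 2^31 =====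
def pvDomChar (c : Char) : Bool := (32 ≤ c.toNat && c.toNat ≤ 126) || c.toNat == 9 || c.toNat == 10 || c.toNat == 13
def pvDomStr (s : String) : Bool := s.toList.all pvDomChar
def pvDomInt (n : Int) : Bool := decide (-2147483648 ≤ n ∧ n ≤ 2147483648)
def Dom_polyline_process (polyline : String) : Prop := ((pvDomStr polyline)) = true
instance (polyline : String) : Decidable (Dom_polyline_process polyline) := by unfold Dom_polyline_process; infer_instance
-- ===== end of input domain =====

-- B replaces A's split/loop/join tokenisation by a single character scan with a 'skipping' flag; same result, no token lists (objective: alternative).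

-- ===== PORT A =====
def polyline_process (polyline : String) : String :=
  let result : List (List Char) :=
    (PySem.Chars.splitOn polyline.toList [';']).foldl
      (fun result data =>
        if PySem.Chars.isIn ['|'] data then
          -- data.split("|")[0]: a split on a non-empty separator is never empty, so index 0 is its head
          result ++ [(PySem.Chars.splitOn data ['|']).headD []]
        else
          result ++ [data]) []
  String.mk (PySem.Chars.join [';'] result)

-- ===== PORT B =====
-- one fold over the characters; state = (output so far, skipping flag)
def polyline_process_alt (polyline : String) : String :=
  let st := polyline.toList.foldl
    (fun (st : List Char × Bool) ch =>
      if st.2 then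
        if ch = ';' then (st.1 ++ [ch], false) else (st.1, true)
      else if ch = '|' then (st.1, true)
      else (st.1 ++ [ch], false)) ([], false)
  String.mk st.1

-- ===== PRECONDITION & SPEC =====
def Spec_polyline_process (polyline : String) (out : String) : Prop := out = polyline_process_alt polyline
instance (polyline : String) (out : String) : Decidable (Spec_polyline_process polyline out) := by unfold Spec_polyline_process; infer_instance

-- ===== CLAIM (what is proved, stated in full; the proofs are below) =====
def Claim_equal_polyline_process : Prop := ∀ (polyline : String), Dom_polyline_process polyline → Spec_polyline_process polyline (polyline_process polyline)

-- ===== LEMMAS AND PROOFS =====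

-- reference splitter on a single-character separator
def splitSingle (c : Char) : List Char → List (List Char)
  | [] => [[]]
  | a :: rest =>
    let r := splitSingle c rest
    if a = c then [] :: r else (a :: r.headD []) :: r.tail

lemma splitSingle_headD_tail (c : Char) (l : List Char) :
    (splitSingle c l).headD [] :: (splitSingle c l).tail = splitSingle c l := by
  cases l with
  | nil => simp [splitSingle]
  | cons a rest => by_cases h : a = c <;> simp [splitSingle, h]

lemma go_single (c : Char) : ∀ (fuel : Nat) (l cur : List Char) (acc : List (List Char)), l.length ≤ fuel →
    PySem.Chars.splitOn.go [c] fuel l cur acc =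
      acc.reverse ++ (cur.reverse ++ (splitSingle c l).headD []) :: (splitSingle c l).tail := by
  intro fuel
  induction fuel with
  | zero =>
    intro l cur acc h
    have : l = [] := List.eq_nil_of_length_eq_zero (Nat.le_zero.mp h)
    subst this
    simp [PySem.Chars.splitOn.go, splitSingle]
  | succ n ih =>
    intro l cur acc h
    cases l with
    | nil => simp [PySem.Chars.splitOn.go, splitSingle]
    | cons a rest =>
      have hr : rest.length ≤ n := by simpa using Nat.succ_le_succ_iff.mp h
      by_cases hac : c = a
      · subst hac
        rw [show PySem.Chars.splitOn.go [c] (n+1) (c :: rest) cur acc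
              = PySem.Chars.splitOn.go [c] n rest [] (cur.reverse :: acc) by
            simp [PySem.Chars.splitOn.go, List.isPrefixOf]]
        rw [ih rest [] (cur.reverse :: acc) hr]
        simp [splitSingle]
        rw [← List.headD_eq_head?_getD]
        exact splitSingle_headD_tail c rest
      · rw [show PySem.Chars.splitOn.go [c] (n+1) (a :: rest) cur acc
              = PySem.Chars.splitOn.go [c] n rest (a :: cur) acc by
            simp [PySem.Chars.splitOn.go, List.isPrefixOf, hac]]
        rw [ih rest (a :: cur) acc hr]
        have hac' : ¬ a = c := fun h' => hac h'.symm
        simp [splitSingle, hac']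

lemma splitOn_single (c : Char) (l : List Char) :
    PySem.Chars.splitOn l [c] = splitSingle c l := by
  unfold PySem.Chars.splitOn
  rw [go_single c (l.length + 1) l [] [] (Nat.le_succ _)]
  simp
  rw [← List.headD_eq_head?_getD]
  exact splitSingle_headD_tail c l

lemma splitSingle_headD (c : Char) (l : List Char) :
    (splitSingle c l).headD [] = l.takeWhile (· ≠ c) := by
  induction l with
  | nil => simp [splitSingle]
  | cons a rest ih =>
    by_cases h : a = c
    · subst h; simp [splitSingle, List.takeWhile]
    · simp [splitSingle, h, List.takeWhile]
      rw [← List.headD_eq_head?_getD]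
      simpa using ih

-- per-token transformation of A, in specification form
def fSpec (d : List Char) : List Char := if '|' ∈ d then d.takeWhile (· ≠ '|') else d

lemma isIn_bar (d : List Char) : PySem.Chars.isIn ['|'] d = decide ('|' ∈ d) := by
  by_cases h : '|' ∈ d
  · simp only [h, decide_true]
    rw [PySem.Chars.isIn_iff_infix]
    obtain ⟨s, t, rfl⟩ := List.mem_iff_append.mp h
    exact ⟨s, t, by simp⟩
  · simp only [h, decide_false]
    rw [PySem.Chars.isIn_eq_false_iff]
    intro hinf
    exact h (List.singleton_sublist.mp hinf.sublist)

lemma seg_eq (d : List Char) :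
    (if PySem.Chars.isIn ['|'] d then (PySem.Chars.splitOn d ['|']).headD [] else d) = fSpec d := by
  rw [isIn_bar, splitOn_single, splitSingle_headD, fSpec]
  by_cases h : '|' ∈ d <;> simp [h]

lemma foldl_concat_map (g : List Char → List Char) :
    ∀ (ts : List (List Char)) (acc : List (List Char)),
      ts.foldl (fun r d => r ++ [g d]) acc = acc ++ ts.map g := by
  intro ts
  induction ts with
  | nil => simp
  | cons t ts ih => intro acc; simp [ih]

-- B's scan as two structural helpers (normal mode / skipping mode)
mutual
def altGo : List Char → List Char
  | [] => []
  | c :: rest => if c = '|' then altSkip rest else c :: altGo rest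
def altSkip : List Char → List Char
  | [] => []
  | c :: rest => if c = ';' then c :: altGo rest else altSkip rest
end

lemma fSpec_nil : fSpec [] = [] := by simp [fSpec]

lemma fSpec_bar (h : List Char) : fSpec ('|' :: h) = [] := by
  simp [fSpec, List.takeWhile]

lemma fSpec_cons {c : Char} (hc : c ≠ '|') (h : List Char) :
    fSpec (c :: h) = c :: fSpec h := by
  by_cases hm : '|' ∈ h
  · simp [fSpec, hm, hc, List.takeWhile]
  · have hnc : ('|' : Char) ≠ c := fun e => hc e.symm
    have hnm : ¬ '|' ∈ (c :: h) := by simp [List.mem_cons, hm, hnc]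
    simp [fSpec, hm, hnm]

lemma join_head_cons (c : Char) (x : List Char) (ys : List (List Char)) :
    PySem.Chars.join [';'] ((c :: x) :: ys) = c :: PySem.Chars.join [';'] (x :: ys) := by
  cases ys with
  | nil => simp [PySem.Chars.join_singleton]
  | cons y ys => simp [PySem.Chars.join_cons_cons]

lemma flat_eq : ∀ (x : List Char) (ts : List (List Char)),
    ((x :: ts).flatMap (fun t => ';' :: t)) = ';' :: PySem.Chars.join [';'] (x :: ts) := by
  intro x ts
  induction ts generalizing x with
  | nil => simp [PySem.Chars.join_singleton]
  | cons y ys ih => simp [PySem.Chars.join_cons_cons, ih y]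

lemma join_nil_cons (ts : List (List Char)) :
    PySem.Chars.join [';'] ([] :: ts) = ts.flatMap (fun t => ';' :: t) := by
  cases ts with
  | nil => simp [PySem.Chars.join_singleton]
  | cons y ys => rw [flat_eq]; simp [PySem.Chars.join_cons_cons]

lemma splitSingle_exists_cons (c : Char) (l : List Char) :
    ∃ h t, splitSingle c l = h :: t := by
  cases l with
  | nil => exact ⟨[], [], rfl⟩
  | cons a rest =>
    by_cases hac : a = c
    · exact ⟨[], splitSingle c rest, by simp [splitSingle, hac]⟩
    · exact ⟨a :: (splitSingle c rest).headD [], (splitSingle c rest).tail,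
        by simp [splitSingle, hac]⟩

lemma main_spec : ∀ (s : List Char),
    altGo s = PySem.Chars.join [';'] ((splitSingle ';' s).map fSpec) ∧
    altSkip s = ((splitSingle ';' s).tail.map fSpec).flatMap (fun t => ';' :: t) := by
  intro s
  induction s with
  | nil => simp [altGo, altSkip, splitSingle, fSpec_nil, PySem.Chars.join_singleton]
  | cons c rest ih =>
    obtain ⟨ihG, ihS⟩ := ih
    obtain ⟨h, t, e⟩ := splitSingle_exists_cons ';' rest
    constructor
    · by_cases hc : c = ';'
      · subst hc
        have h1 : splitSingle ';' (';' :: rest) = [] :: h :: t := by simp [splitSingle, e]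
        rw [show altGo (';' :: rest) = ';' :: altGo rest from by simp [altGo], h1,
            List.map_cons, fSpec_nil, join_nil_cons, List.map_cons, flat_eq, ← List.map_cons,
            ← e, ← ihG]
      · have h1 : splitSingle ';' (c :: rest) = (c :: h) :: t := by simp [splitSingle, hc, e]
        by_cases hb : c = '|'
        · subst hb
          rw [show altGo ('|' :: rest) = altSkip rest from by simp [altGo], h1,
              List.map_cons, fSpec_bar, join_nil_cons, ihS, e, List.tail_cons]
        · rw [show altGo (c :: rest) = c :: altGo rest from by simp [altGo, hb], h1,
              List.map_cons, fSpec_cons hb, join_head_cons, ← List.map_cons, ← e, ← ihG]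
    · by_cases hc : c = ';'
      · subst hc
        have h1 : splitSingle ';' (';' :: rest) = [] :: h :: t := by simp [splitSingle, e]
        rw [show altSkip (';' :: rest) = ';' :: altGo rest from by simp [altSkip], h1,
            List.tail_cons, List.map_cons, flat_eq, ← List.map_cons, ← e, ← ihG]
      · have h1 : splitSingle ';' (c :: rest) = (c :: h) :: t := by simp [splitSingle, hc, e]
        rw [show altSkip (c :: rest) = altSkip rest from by simp [altSkip, hc], h1,
            List.tail_cons, ihS, e, List.tail_cons]

lemma fold1 : ∀ (s : List Char) (out : List Char) (b : Bool),
    (s.foldl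
      (fun (st : List Char × Bool) ch =>
        if st.2 then
          if ch = ';' then (st.1 ++ [ch], false) else (st.1, true)
        else if ch = '|' then (st.1, true)
        else (st.1 ++ [ch], false)) (out, b)).1
      = out ++ (if b then altSkip s else altGo s) := by
  intro s
  induction s with
  | nil => intro out b; cases b <;> simp [altGo, altSkip]
  | cons ch rest ih =>
    intro out b
    cases b with
    | false =>
      by_cases hb : ch = '|'
      · subst hb
        simpa [altGo] using ih out true
      · simpa [altGo, hb] using ih (out ++ [ch]) false
    | true =>
      by_cases hc : ch = ';'
      · subst hc
        simpa [altSkip] using ih (out ++ [';']) false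
      · simpa [altSkip, hc] using ih out true

-- ===== VERDICT (by name: the statement is the Claim_ definition above) =====
theorem polyline_process_spec : Claim_equal_polyline_process := by
  intro polyline _
  unfold Spec_polyline_process polyline_process polyline_process_alt
  dsimp only
  rw [fold1 polyline.toList [] false]
  have hstep : (fun (result : List (List Char)) data =>
      if PySem.Chars.isIn ['|'] data then result ++ [(PySem.Chars.splitOn data ['|']).headD []]
      else result ++ [data]) = fun result data => result ++ [fSpec data] := by
    funext r d
    rw [← seg_eq d]
    by_cases h : PySem.Chars.isIn ['|'] d <;> simp [h]
  rw [hstep, foldl_concat_map fSpec, splitOn_single, List.nil_append,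
    ← (main_spec polyline.toList).1]
  simp
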